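-- pv_equiv track=rewrite | github.com/fjkiani/crispro-backend-v2 | api/services/trial_intelligence_universal/config.py | zip_to_state
-- ===== SOURCE A (Python) =====
-- from typing import List, Set, Dict, Any, Optional
--
-- ZIP_PREFIX_TO_STATE = {
--     # New York: 100-149
--     **{str(i): 'NY' for i in range(100, 150)},
--     # New Jersey: 070-089
--     **{str(i).zfill(3): 'NJ' for i in range(70, 90)},
--     # Connecticut: 060-069
--     **{str(i).zfill(3): 'CT' for i in range(60, 70)},
--     # California: 900-961
--     **{str(i): 'CA' for i in range(900, 962)},
--     # Texas: 733, 750-799, 770-799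
--     **{str(i): 'TX' for i in range(750, 800)},
--     '733': 'TX',
--     # Florida: 320-349
--     **{str(i): 'FL' for i in range(320, 350)},
--     # Illinois: 600-629
--     **{str(i): 'IL' for i in range(600, 630)},
--     # Pennsylvania: 150-199
--     **{str(i): 'PA' for i in range(150, 200)},
--     # Ohio: 430-459
--     **{str(i): 'OH' for i in range(430, 460)},
--     # Massachusetts: 010-027, 055
--     **{str(i).zfill(3): 'MA' for i in range(10, 28)},
--     '055': 'MA',
--     # Add more as needed...
-- }
--
-- def zip_to_state(zip_code: str) -> Optional[str]:
--     """Convert ZIP code to state code using 3-digit prefix."""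
--     if not zip_code:
--         return None
--     # Extract first 3 digits
--     zip_clean = ''.join(c for c in zip_code if c.isdigit())
--     if len(zip_clean) >= 3:
--         zip_prefix_3 = zip_clean[:3]
--         return ZIP_PREFIX_TO_STATE.get(zip_prefix_3)
--     return None
-- ===== SOURCE B (Python) =====
-- _ZIP_RANGES = [
--     (100, 149, 'NY'), (70, 89, 'NJ'), (60, 69, 'CT'), (900, 961, 'CA'),
--     (750, 799, 'TX'), (733, 733, 'TX'), (320, 349, 'FL'), (600, 629, 'IL'),
--     (150, 199, 'PA'), (430, 459, 'OH'), (10, 27, 'MA'), (55, 55, 'MA'),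
-- ]
--
-- def zip_to_state(zip_code):
--     """Convert ZIP code to state: single scan accumulating the first three
--     digit values into an int, then a 12-entry range-table lookup."""
--     n = 0
--     cnt = 0
--     for c in zip_code:
--         if c.isdigit():
--             n = n * 10 + (ord(c) - 48)
--             cnt += 1
--             if cnt == 3:
--                 for lo, hi, st in _ZIP_RANGES:
--                     if lo <= n <= hi:
--                         return st
--                 return None
--     return None
-- ===== Notes on version B (the rewrite author's own statement) =====
-- stated objective: alternative
-- what changed: B replaces A's staged pipeline (build filtered digit string, slice first 3, look up in a 352-entry precomputed dict) with a single left-to-right scan that accumulates the first three digit values into an int and exits early at the third digit, then decides the state by scanning a 12-entry (lo,hi,state) range table.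
import Mathlib
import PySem

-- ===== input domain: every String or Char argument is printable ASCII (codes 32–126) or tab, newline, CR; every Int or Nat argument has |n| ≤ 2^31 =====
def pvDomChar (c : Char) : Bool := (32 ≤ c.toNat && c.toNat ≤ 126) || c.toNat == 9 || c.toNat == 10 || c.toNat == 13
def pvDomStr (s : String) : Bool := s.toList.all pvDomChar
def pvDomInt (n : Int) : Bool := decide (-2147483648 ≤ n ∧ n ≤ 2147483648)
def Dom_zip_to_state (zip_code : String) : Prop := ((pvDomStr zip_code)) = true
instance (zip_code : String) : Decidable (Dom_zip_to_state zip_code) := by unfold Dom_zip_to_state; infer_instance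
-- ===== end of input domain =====

-- B replaces A's filter/slice/352-entry-dict pipeline with a single scan accumulating the first three digit values into an int, decided by a 12-entry range table (different decomposition; the scan exits at the third digit).


-- ===== PORT A =====
-- the module-level ZIP_PREFIX_TO_STATE dict, built exactly as in A (dict comprehensions over ranges, unpacked in order)
def ZIP_PREFIX_TO_STATE : PySem.Dict String String :=
  let d := (PySem.List.pyRange 100 150 1).foldl (fun d i => d.insert (PySem.Int.toStr i) "NY") PySem.Dict.empty
  let d := (PySem.List.pyRange 70 90 1).foldl (fun d i => d.insert (PySem.Str.zfill (PySem.Int.toStr i) 3) "NJ") d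
  let d := (PySem.List.pyRange 60 70 1).foldl (fun d i => d.insert (PySem.Str.zfill (PySem.Int.toStr i) 3) "CT") d
  let d := (PySem.List.pyRange 900 962 1).foldl (fun d i => d.insert (PySem.Int.toStr i) "CA") d
  let d := (PySem.List.pyRange 750 800 1).foldl (fun d i => d.insert (PySem.Int.toStr i) "TX") d
  let d := d.insert "733" "TX"
  let d := (PySem.List.pyRange 320 350 1).foldl (fun d i => d.insert (PySem.Int.toStr i) "FL") d
  let d := (PySem.List.pyRange 600 630 1).foldl (fun d i => d.insert (PySem.Int.toStr i) "IL") d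
  let d := (PySem.List.pyRange 150 200 1).foldl (fun d i => d.insert (PySem.Int.toStr i) "PA") d
  let d := (PySem.List.pyRange 430 460 1).foldl (fun d i => d.insert (PySem.Int.toStr i) "OH") d
  let d := (PySem.List.pyRange 10 28 1).foldl (fun d i => d.insert (PySem.Str.zfill (PySem.Int.toStr i) 3) "MA") d
  d.insert "055" "MA"

def zip_to_state (zip_code : String) : Option String :=
  if zip_code = "" then none
  else
    let zip_clean := zip_code.toList.filter PySem.Chars.isdigit
    if 3 ≤ zip_clean.length then
      let zip_prefix_3 := String.ofList (zip_clean.take 3)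
      ZIP_PREFIX_TO_STATE.get? zip_prefix_3
    else none

-- ===== PORT B =====
-- B's module-level 12-entry range table
def zipRanges : List (Int × Int × String) :=
  [(100,149,"NY"),(70,89,"NJ"),(60,69,"CT"),(900,961,"CA"),(750,799,"TX"),(733,733,"TX"),
   (320,349,"FL"),(600,629,"IL"),(150,199,"PA"),(430,459,"OH"),(10,27,"MA"),(55,55,"MA")]

-- B's inner `for lo, hi, st in _ZIP_RANGES` loop (returns on first containing range)
def findRange (n : Int) : List (Int × Int × String) → Option String
  | [] => none
  | (lo, hi, st) :: rest => if lo ≤ n ∧ n ≤ hi then some st else findRange n rest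

-- B's outer `for c in zip_code` loop with accumulators n, cnt and the early return at cnt == 3
def zipScan (n : Int) (cnt : Nat) : List Char → Option String
  | [] => none
  | c :: rest =>
    if PySem.Chars.isdigit c then
      let n' := n * 10 + ((c.toNat : Int) - 48)
      if cnt + 1 = 3 then findRange n' zipRanges
      else zipScan n' (cnt + 1) rest
    else zipScan n cnt rest

def zip_to_state_alt (zip_code : String) : Option String := zipScan 0 0 zip_code.toList

-- ===== PRECONDITION & SPEC =====
def Spec_zip_to_state (zip_code : String) (out : Option String) : Prop := out = zip_to_state_alt zip_code
instance (zip_code : String) (out : Option String) : Decidable (Spec_zip_to_state zip_code out) := by unfold Spec_zip_to_state; infer_instance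

-- ===== CLAIM (what is proved, stated in full; the proofs are below) =====
def Claim_equal_zip_to_state : Prop := ∀ (zip_code : String), Dom_zip_to_state zip_code → Spec_zip_to_state zip_code (zip_to_state zip_code)

-- ===== LEMMAS AND PROOFS =====

-- any char Python's isdigit accepts is one of '0'..'9'
lemma digit_char_eq (c : Char) (h : PySem.Chars.isdigit c = true) :
    ∃ d : Fin 10, c = Char.ofNat (48 + d.val) := by
  simp only [PySem.Chars.isdigit, Bool.and_eq_true, decide_eq_true_eq] at h
  obtain ⟨h1, h2⟩ := h
  have h1' : 48 ≤ c.toNat := by exact h1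
  have h2' : c.toNat ≤ 57 := by exact h2
  refine ⟨⟨c.toNat - 48, by omega⟩, ?_⟩
  have : 48 + (c.toNat - 48) = c.toNat := by omega
  rw [this]
  exact (Char.ofNat_toNat c).symm

-- the canonical 3-digit decimal string of m < 1000
def key3 (m : Nat) : String :=
  String.ofList [Char.ofNat (48 + m / 100), Char.ofNat (48 + m / 10 % 10), Char.ofNat (48 + m % 10)]

-- one contiguous block of A's dict: keys key3 lo .. key3 (lo+len-1), all mapped to state st
def blockSpec (lo len : Nat) (st : String) : List (String × String) :=
  (List.range' lo len).map (fun m => (key3 m, st))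

-- the items of A's dict, block by block, in insertion order
def tableSpec : List (String × String) :=
  blockSpec 100 50 "NY" ++ blockSpec 70 20 "NJ" ++ blockSpec 60 10 "CT" ++ blockSpec 900 62 "CA" ++
  blockSpec 750 50 "TX" ++ blockSpec 733 1 "TX" ++ blockSpec 320 30 "FL" ++ blockSpec 600 30 "IL" ++
  blockSpec 150 50 "PA" ++ blockSpec 430 30 "OH" ++ blockSpec 10 18 "MA" ++ blockSpec 55 1 "MA"

set_option maxRecDepth 100000 in
set_option maxHeartbeats 3000000 in
lemma titems : ZIP_PREFIX_TO_STATE.items = tableSpec := by decide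

lemma toNat_digitChar (d : Nat) (hd : d ≤ 9) : (Char.ofNat (48 + d)).toNat = 48 + d := by
  rw [Char.toNat_ofNat]
  have : (48 + d).isValidChar := by left; omega
  simp [this]

lemma key3_inj (m n : Nat) (hm : m < 1000) (hn : n < 1000) (h : key3 m = key3 n) : m = n := by
  unfold key3 at h
  have h' := congrArg String.toList h
  simp only [String.toList_ofList] at h'
  have h1 := congrArg Char.toNat (List.head_eq_of_cons_eq h')
  have h2 := congrArg Char.toNat (List.head_eq_of_cons_eq (List.tail_eq_of_cons_eq h'))
  have h3 := congrArg Char.toNat (List.head_eq_of_cons_eq (List.tail_eq_of_cons_eq (List.tail_eq_of_cons_eq h')))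
  rw [toNat_digitChar _ (by omega), toNat_digitChar _ (by omega)] at h1 h2 h3
  omega

lemma find?_blockSpec (lo len n : Nat) (st : String) (hn : n < 1000) (hb : lo + len ≤ 1000) :
    (blockSpec lo len st).find? (fun p => p.1 == key3 n) =
      if lo ≤ n ∧ n < lo + len then some (key3 n, st) else none := by
  induction len generalizing lo with
  | zero => simp [blockSpec]
  | succ k ih =>
    rw [blockSpec, List.range'_succ, List.map_cons, List.find?_cons]
    by_cases he : lo = n
    · subst he
      simp only [beq_self_eq_true]
      simp [show lo ≤ lo ∧ lo < lo + (k+1) by omega]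
    · have : (key3 lo == key3 n) = false := by
        rw [beq_eq_false_iff_ne]
        intro hk
        exact he (key3_inj lo n (by omega) hn hk)
      rw [this]
      have hrec := ih (lo + 1) (by omega)
      rw [blockSpec] at hrec
      rw [hrec]
      have h2 : (lo + 1 ≤ n ∧ n < lo + 1 + k) ↔ (lo ≤ n ∧ n < lo + (k + 1)) := by omega
      rw [if_congr h2 rfl rfl]

lemma find?_tableSpec (n : Nat) (hn : n < 1000) :
    tableSpec.find? (fun p => p.1 == key3 n) =
      if 100 ≤ n ∧ n < 150 then some (key3 n, "NY")
      else if 70 ≤ n ∧ n < 90 then some (key3 n, "NJ")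
      else if 60 ≤ n ∧ n < 70 then some (key3 n, "CT")
      else if 900 ≤ n ∧ n < 962 then some (key3 n, "CA")
      else if 750 ≤ n ∧ n < 800 then some (key3 n, "TX")
      else if 733 ≤ n ∧ n < 734 then some (key3 n, "TX")
      else if 320 ≤ n ∧ n < 350 then some (key3 n, "FL")
      else if 600 ≤ n ∧ n < 630 then some (key3 n, "IL")
      else if 150 ≤ n ∧ n < 200 then some (key3 n, "PA")
      else if 430 ≤ n ∧ n < 460 then some (key3 n, "OH")
      else if 10 ≤ n ∧ n < 28 then some (key3 n, "MA")
      else if 55 ≤ n ∧ n < 56 then some (key3 n, "MA")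
      else none := by
  rw [tableSpec]
  simp only [List.find?_append]
  rw [find?_blockSpec 100 50 n "NY" hn (by omega), find?_blockSpec 70 20 n "NJ" hn (by omega),
      find?_blockSpec 60 10 n "CT" hn (by omega), find?_blockSpec 900 62 n "CA" hn (by omega),
      find?_blockSpec 750 50 n "TX" hn (by omega), find?_blockSpec 733 1 n "TX" hn (by omega),
      find?_blockSpec 320 30 n "FL" hn (by omega), find?_blockSpec 600 30 n "IL" hn (by omega),
      find?_blockSpec 150 50 n "PA" hn (by omega), find?_blockSpec 430 30 n "OH" hn (by omega),
      find?_blockSpec 10 18 n "MA" hn (by omega), find?_blockSpec 55 1 n "MA" hn (by omega)]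
  have hor : ∀ (P : Prop) (inst : Decidable P) (v : String × String) (y : Option (String × String)),
      Option.or (if P then some v else none) y = if P then some v else y := by
    intro P inst v y
    split <;> rfl
  simp only [Option.or_assoc]
  simp only [hor]

-- the if-chain of find?_tableSpec after projecting to the value
def chainNat (n : Nat) : Option String :=
  if 100 ≤ n ∧ n < 150 then some "NY"
  else if 70 ≤ n ∧ n < 90 then some "NJ"
  else if 60 ≤ n ∧ n < 70 then some "CT"
  else if 900 ≤ n ∧ n < 962 then some "CA"
  else if 750 ≤ n ∧ n < 800 then some "TX"
  else if 733 ≤ n ∧ n < 734 then some "TX"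
  else if 320 ≤ n ∧ n < 350 then some "FL"
  else if 600 ≤ n ∧ n < 630 then some "IL"
  else if 150 ≤ n ∧ n < 200 then some "PA"
  else if 430 ≤ n ∧ n < 460 then some "OH"
  else if 10 ≤ n ∧ n < 28 then some "MA"
  else if 55 ≤ n ∧ n < 56 then some "MA"
  else none

set_option maxRecDepth 4000 in
lemma chain_eq : ∀ n : Fin 1000, chainNat n.val = findRange (n.val : Int) zipRanges := by decide

lemma main3 (n : Nat) (hn : n < 1000) :
    Option.map (fun x => x.2) (tableSpec.find? (fun p => p.1 == key3 n)) = findRange (n : Int) zipRanges := by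
  rw [find?_tableSpec n hn]
  have hmap : ∀ (P : Prop) (inst : Decidable P) (v : String × String) (y : Option (String × String)),
      Option.map (fun x : String × String => x.2) (if P then some v else y)
        = if P then some v.2 else Option.map (fun x : String × String => x.2) y := by
    intro P inst v y
    split <;> rfl
  simp only [hmap, Option.map_none]
  exact chain_eq ⟨n, hn⟩

lemma key_eq (a b c : Fin 10) :
    String.ofList [Char.ofNat (48 + a.val), Char.ofNat (48 + b.val), Char.ofNat (48 + c.val)]
      = key3 (100 * a.val + 10 * b.val + c.val) := by
  have e1 : (100 * a.val + 10 * b.val + c.val) / 100 = a.val := by omega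
  have e2 : (100 * a.val + 10 * b.val + c.val) / 10 % 10 = b.val := by omega
  have e3 : (100 * a.val + 10 * b.val + c.val) % 10 = c.val := by omega
  rw [key3, e1, e2, e3]

-- zipScan on the digits only: the scan with the non-digit skips removed
def zipAux (n : Int) (cnt : Nat) : List Char → Option String
  | [] => none
  | c :: rest =>
    let n' := n * 10 + ((c.toNat : Int) - 48)
    if cnt + 1 = 3 then findRange n' zipRanges
    else zipAux n' (cnt + 1) rest

lemma zipScan_eq_aux (l : List Char) (n : Int) (cnt : Nat) :
    zipScan n cnt l = zipAux n cnt (l.filter PySem.Chars.isdigit) := by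
  induction l generalizing n cnt with
  | nil => rfl
  | cons c rest ih =>
    by_cases h : PySem.Chars.isdigit c
    · rw [List.filter_cons_of_pos h, zipScan, zipAux, if_pos h]
      split
      · rfl
      · exact ih _ _
    · rw [List.filter_cons_of_neg (by simp [h]), zipScan, if_neg (by simp [h])]
      exact ih _ _

lemma zipAux_short (l : List Char) (n : Int) (cnt : Nat) (h : l.length + cnt < 3) :
    zipAux n cnt l = none := by
  induction l generalizing n cnt with
  | nil => rfl
  | cons c rest ih =>
    rw [zipAux, if_neg (by simp at h ⊢; omega)]
    apply ih
    simp at h ⊢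
    omega

-- ===== VERDICT (by name: the statement is the Claim_ definition above) =====
theorem zip_to_state_spec : Claim_equal_zip_to_state := by
  intro s _hdom
  unfold Spec_zip_to_state zip_to_state zip_to_state_alt
  rw [zipScan_eq_aux]
  by_cases hs : s = ""
  · subst hs
    simp [zipAux]
  · simp only [hs, if_false]
    set clean := s.toList.filter PySem.Chars.isdigit with hclean
    by_cases hlen : 3 ≤ clean.length
    · simp only [hlen, if_true]
      obtain ⟨c1, c2, c3, rest, hsplit⟩ : ∃ c1 c2 c3 rest, clean = c1 :: c2 :: c3 :: rest := by
        match h : clean, hlen with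
        | c1 :: c2 :: c3 :: rest, _ => exact ⟨c1, c2, c3, rest, rfl⟩
      have hd1 : PySem.Chars.isdigit c1 = true := by
        have h1 : c1 ∈ clean := by rw [hsplit]; simp
        exact List.of_mem_filter (hclean ▸ h1)
      have hd2 : PySem.Chars.isdigit c2 = true := by
        have h1 : c2 ∈ clean := by rw [hsplit]; simp
        exact List.of_mem_filter (hclean ▸ h1)
      have hd3 : PySem.Chars.isdigit c3 = true := by
        have h1 : c3 ∈ clean := by rw [hsplit]; simp
        exact List.of_mem_filter (hclean ▸ h1)
      obtain ⟨a, ha⟩ := digit_char_eq c1 hd1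
      obtain ⟨b, hb⟩ := digit_char_eq c2 hd2
      obtain ⟨c, hc⟩ := digit_char_eq c3 hd3
      rw [hsplit]
      simp only [List.take_succ_cons, List.take_zero]
      rw [ha, hb, hc, key_eq a b c]
      -- B side: three zipAux steps
      rw [zipAux, if_neg (by omega), zipAux, if_neg (by omega), zipAux, if_pos rfl]
      have hv : (0 * 10 + ((Char.ofNat (48 + a.val)).toNat - 48 : Int)) * 10
                  + ((Char.ofNat (48 + b.val)).toNat - 48 : Int)
                  = 10 * a.val + b.val := by
        rw [toNat_digitChar a.val (by omega), toNat_digitChar b.val (by omega)]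
        push_cast; ring
      have hv3 : ((0 * 10 + ((Char.ofNat (48 + a.val)).toNat - 48 : Int)) * 10
                  + ((Char.ofNat (48 + b.val)).toNat - 48 : Int)) * 10
                  + ((Char.ofNat (48 + c.val)).toNat - 48 : Int)
                  = ((100 * a.val + 10 * b.val + c.val : Nat) : Int) := by
        rw [hv, toNat_digitChar c.val (by omega)]
        push_cast; ring
      rw [hv3]
      have := main3 (100 * a.val + 10 * b.val + c.val) (by omega)
      rw [← this]
      simp only [PySem.Dict.get?, titems]
    · simp only [hlen, if_false]
      exact (zipAux_short clean 0 0 (by omega)).symm
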